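-- pv_equiv track=rewrite | github.com/dirtysalt/codes | leetcode/count-the-number-of-good-nodes.py | countGoodNodes
-- ===== SOURCE A (Python) =====
-- from typing import List
--
-- def countGoodNodes(edges: List[List[int]]) -> int:
--     n = len(edges) + 1
--     adj = [[] for _ in range(n)]
--     for x, y in edges:
--         adj[x].append(y)
--         adj[y].append(x)
--
--     ans = [0]
--
--     def dfs(r, p):
--         if len(adj[r]) == 1 and adj[r][0] == p:
--             ans[0] += 1
--             return 1
--
--         c = []
--         for x in adj[r]:
--             if x == p: continue
--             h = dfs(x, r)
--             c.append(h)
--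
--         if all((x == c[0] for x in c)):
--             ans[0] += 1
--         return sum(c) + 1
--
--     dfs(0, -1)
--     return ans[0]
-- ===== SOURCE B (Python) =====
-- from typing import List
--
-- def countGoodNodes(edges: List[List[int]]) -> int:
--     n = len(edges) + 1
--     adj = [[] for _ in range(n)]
--     for x, y in edges:
--         adj[x].append(y)
--         adj[y].append(x)
--
--     # explicit-stack iterative machine replacing the recursion:
--     # frame = (node, pending children, collected child subtree sizes);
--     # ret carries the size returned by the frame that just finished.
--     good = 0
--     stack = [(0, [x for x in adj[0] if x != -1], [])]
--     ret = None
--     while stack: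
--         r, pending, c = stack.pop()
--         if ret is not None:
--             c = c + [ret]
--             ret = None
--         if pending:
--             x = pending[0]
--             stack.append((r, pending[1:], c))
--             stack.append((x, [y for y in adj[x] if y != r], []))
--         else:
--             if all(s == c[0] for s in c):
--                 good += 1
--             ret = sum(c) + 1
--     return good
-- ===== Notes on version B (the rewrite author's own statement) =====
-- stated objective: alternative
-- what changed: The recursive DFS with a closure counter is replaced by an explicit-stack iterative machine: frames of (node, pending-children list, collected child sizes) plus a return register, with the redundant leaf special case dropped (an empty child list is already counted good).
import Mathlib
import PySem

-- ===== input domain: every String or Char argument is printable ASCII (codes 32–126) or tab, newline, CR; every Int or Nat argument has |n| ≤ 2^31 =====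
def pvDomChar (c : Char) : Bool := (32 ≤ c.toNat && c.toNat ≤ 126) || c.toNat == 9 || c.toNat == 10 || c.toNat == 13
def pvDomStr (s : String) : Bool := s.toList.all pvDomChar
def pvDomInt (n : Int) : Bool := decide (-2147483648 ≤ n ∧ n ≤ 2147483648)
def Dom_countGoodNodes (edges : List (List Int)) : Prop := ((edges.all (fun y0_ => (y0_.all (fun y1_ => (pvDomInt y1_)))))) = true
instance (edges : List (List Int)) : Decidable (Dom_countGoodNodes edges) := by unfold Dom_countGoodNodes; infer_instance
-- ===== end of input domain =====

-- B replaces A's recursive DFS (closure counter, redundant leaf case) by an explicit-stack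
-- iterative machine over frames (node, pending children, collected child sizes) — alternative decomposition.


-- ===== PORT A =====

-- adj[i].append(v)  (Python negative-index semantics via pySetD/pyGetD; out of range = IndexError, outside Pre_)
def pvAppendAt (adj : List (List Int)) (i v : Int) : List (List Int) :=
  PySem.List.pySetD adj i (PySem.List.pyGetD adj i [] ++ [v])

-- adj = [[] for _ in range(n)]; for x, y in edges: adj[x].append(y); adj[y].append(x)
-- (both Python programs build the adjacency list with this identical loop; a row that is not a
--  pair raises ValueError in Python — outside Pre_, the row is skipped here)
def pvBuildAdj (edges : List (List Int)) : List (List Int) :=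
  edges.foldl (fun adj e =>
    match e with
    | [x, y] => pvAppendAt (pvAppendAt adj x y) y x
    | _ => adj)
    (List.replicate (edges.length + 1) [])

-- recursion-depth budget for both ports: on any input satisfying Pre_ the DFS call depth is at
-- most the number of (parent, node) states plus one (a deeper branch would repeat a state and the
-- recursion could be pumped forever, contradicting Pre_), so this fuel is never exhausted there
def pvFuel (edges : List (List Int)) : Nat :=
  (2 * edges.length + 2) * (2 * edges.length + 2) + 2

-- A's dfs(r, p), returning (subtree size, ans); ans is threaded for the closure variable ans[0].
def dfsA (adj : List (List Int)) : Nat → Int → Int → Int → Int × Int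
  | 0, _, _, ans => (0, ans)
  | fuel + 1, r, p, ans =>
    let ar := PySem.List.pyGetD adj r []
    if ar.length = 1 ∧ ar.headD 0 = p then (1, ans + 1)
    else
      let res := ar.foldl (fun (st : List Int × Int) x =>
        if x = p then st
        else
          let h := dfsA adj fuel x r st.2
          (st.1 ++ [h.1], h.2)) ([], ans)
      let c := res.1
      let ans' := if c.all (fun x => x = c.headD 0) then res.2 + 1 else res.2
      (c.sum + 1, ans')

def countGoodNodes (edges : List (List Int)) : Int :=
  let adj := pvBuildAdj edges
  (dfsA adj (pvFuel edges) 0 (-1) 0).2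

-- ===== PORT B =====

-- termination bookkeeping for the machine below (not part of Source B's state): a bound on any row
-- length of adj, and an exponential frame weight, so that pushing a child frame shrinks the measure
def pvRowMax (adj : List (List Int)) : Nat :=
  adj.foldl (fun m row => max m row.length) 0

def pvWeight (adj : List (List Int)) (fr : Nat × Int × List Int × List Int) : Nat :=
  (fr.2.2.1.length + 1) * (pvRowMax adj + 2) ^ fr.1

def pvMeasure (adj : List (List Int)) (st : List (Nat × Int × List Int × List Int)) : Nat :=
  (st.map (pvWeight adj)).sum

theorem pvRow_le_rowMax (adj : List (List Int)) (x : Int) :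
    (PySem.List.pyGetD adj x []).length ≤ pvRowMax adj := by
  by_cases hr : PySem.Raise.InRange adj.length x
  · have hmem := PySem.List.pyGetD_mem (xs := adj) (i := x) (d := ([] : List Int)) hr
    have := (PySem.List.le_foldl_max_nat adj List.length 0).2 _ hmem
    simpa [pvRowMax] using this
  · rw [PySem.List.pyGetD_of_none adj x [] ((PySem.List.pyGet?_eq_none_iff adj x).mpr hr)]
    simp

theorem pvPush_lt (adj : List (List Int)) (f : Nat) (r x : Int) (tl c' c : List Int)
    (rest : List (Nat × Int × List Int × List Int)) :
    pvMeasure adj ((f, x, (PySem.List.pyGetD adj x []).filter (fun y => decide (y ≠ r)), []) ::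
        (f + 1, r, tl, c') :: rest)
      < pvMeasure adj ((f + 1, r, x :: tl, c) :: rest) := by
  simp only [pvMeasure, List.map_cons, List.sum_cons, pvWeight, List.length_cons]
  have hch : ((PySem.List.pyGetD adj x []).filter (fun y => decide (y ≠ r))).length + 1
      ≤ pvRowMax adj + 1 :=
    Nat.add_le_add_right (le_trans (List.length_filter_le _ _) (pvRow_le_rowMax adj x)) 1
  have hpow : 0 < (pvRowMax adj + 2) ^ f := Nat.pow_pos (by omega)
  have h1 : (((PySem.List.pyGetD adj x []).filter (fun y => decide (y ≠ r))).length + 1)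
      * (pvRowMax adj + 2) ^ f < (pvRowMax adj + 2) ^ (f + 1) := by
    calc _ ≤ (pvRowMax adj + 1) * (pvRowMax adj + 2) ^ f := Nat.mul_le_mul_right _ hch
    _ < (pvRowMax adj + 2) * (pvRowMax adj + 2) ^ f :=
        (Nat.mul_lt_mul_right hpow).mpr (by omega)
    _ = (pvRowMax adj + 2) ^ (f + 1) := by ring
  have h2 : (tl.length + 1 + 1) * (pvRowMax adj + 2) ^ (f + 1)
      = (tl.length + 1) * (pvRowMax adj + 2) ^ (f + 1) + (pvRowMax adj + 2) ^ (f + 1) := by ring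
  omega

-- the machine of Source B's while loop: each frame is (fuel, node, pending children, child sizes);
-- fuel is a per-frame recursion-depth budget added only to make the Lean function total (a frame
-- created with fuel 0 returns size 0, exactly as dfsA does when its fuel runs out)
def runB (adj : List (List Int)) :
    List (Nat × Int × List Int × List Int) → Option Int → Int → Int
  | [], _, good => good
  | (0, _, _, _) :: rest, _, good => runB adj rest (some 0) good
  | (f + 1, r, pending, c) :: rest, ret, good =>
    let c' := c ++ ret.toList
    match pending with
    | [] =>
      runB adj rest (some (c'.sum + 1))
        (if c'.all (fun s => s = c'.headD 0) then good + 1 else good)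
    | x :: tl =>
      runB adj ((f, x, (PySem.List.pyGetD adj x []).filter (fun y => decide (y ≠ r)), []) ::
        (f + 1, r, tl, c') :: rest) none good
termination_by st _ _ => pvMeasure adj st
decreasing_by
  · simp [pvMeasure, pvWeight]
  · simp [pvMeasure, pvWeight]
  · exact pvPush_lt adj f r x tl (c ++ ret.toList) c rest

def countGoodNodes_alt (edges : List (List Int)) : Int :=
  let adj := pvBuildAdj edges
  runB adj [(pvFuel edges, 0, (PySem.List.pyGetD adj 0 []).filter (fun y => decide (y ≠ -1)), [])] none 0

-- ===== PRECONDITION & SPEC =====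

-- one step of A's DFS viewed on (parent, node) states: the successor states of s
def pvSucc (adj : List (List Int)) (s : Int × Int) : List (Int × Int) :=
  (PySem.List.pyGetD adj s.2 []).filterMap (fun x => if x = s.1 then none else some (s.2, x))

def pvFront (adj : List (List Int)) (f : List (Int × Int)) : List (Int × Int) :=
  PySem.Set.ofList (f.flatMap (pvSucc adj))

-- the walk frontier becomes empty within k steps (once empty it stays empty)
def pvExhausts (adj : List (List Int)) : Nat → List (Int × Int) → Bool
  | 0, f => f.isEmpty
  | k + 1, f => if f.isEmpty then true else pvExhausts adj k (pvFront adj f)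

-- Pre_ is exactly where the Python A returns normally: every row is a pair (else ValueError on
-- unpacking), every endpoint is a valid Python index into the n lists (else IndexError, negative
-- indices count from the end), and the DFS terminates — i.e. the input graph admits no
-- non-backtracking walk from node 0 of length pvFuel (by state pumping, arbitrarily long ones
-- and hence an infinite recursion would exist otherwise), stated as an empty walk frontier.
def Pre_countGoodNodes (edges : List (List Int)) : Prop :=
  (∀ e ∈ edges, e.length = 2 ∧
    ∀ v ∈ e, -((edges.length : Int) + 1) ≤ v ∧ v < (edges.length : Int) + 1) ∧
  pvExhausts (pvBuildAdj edges) (pvFuel edges) [(-1, 0)] = true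

instance (edges : List (List Int)) : Decidable (Pre_countGoodNodes edges) := by
  unfold Pre_countGoodNodes; infer_instance

def pvWitness_countGoodNodes : List (List Int) := [[0, 1], [1, 2]]

def Spec_countGoodNodes (edges : List (List Int)) (out : Int) : Prop := out = countGoodNodes_alt edges
instance (edges : List (List Int)) (out : Int) : Decidable (Spec_countGoodNodes edges out) := by unfold Spec_countGoodNodes; infer_instance

-- ===== CLAIM (what is proved, stated in full; the proofs are below) =====
def Claim_equal_countGoodNodes : Prop := ∀ (edges : List (List Int)), Dom_countGoodNodes edges → Pre_countGoodNodes edges → Spec_countGoodNodes edges (countGoodNodes edges)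

-- ===== LEMMAS AND PROOFS =====
-- The two ports are proved equal for EVERY input and every fuel value (runB_frame): the machine
-- run from a fresh frame for (r, p) at fuel f continues as the rest of the stack with dfsA's
-- size in the return register and dfsA's counter added to good. The verdict does not need Pre_;
-- Pre_ only delimits where the Python A returns normally.

-- an incoming return value is the same as having it already appended to c
theorem runB_absorb (adj : List (List Int)) (f : Nat) (r v good : Int)
    (pending c : List Int) (rest : List (Nat × Int × List Int × List Int)) :
    runB adj ((f + 1, r, pending, c) :: rest) (some v) good
      = runB adj ((f + 1, r, pending, c ++ [v]) :: rest) none good := by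
  cases pending <;> simp [runB]

theorem runB_frame (adj : List (List Int)) (f : Nat) :
    ∀ (r p good : Int) (rest : List (Nat × Int × List Int × List Int)),
    runB adj ((f, r, (PySem.List.pyGetD adj r []).filter (fun y => decide (y ≠ p)), []) :: rest)
        none good
      = runB adj rest (some (dfsA adj f r p good).1) (dfsA adj f r p good).2 := by
  induction f with
  | zero => intro r p good rest; simp [runB, dfsA]
  | succ f ih =>
    -- inner induction: a partially processed frame continues like A's fold over the pending list
    have inner : ∀ (tl : List Int) (r : Int) (c : List Int) (good : Int)
        (rest : List (Nat × Int × List Int × List Int)),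
        runB adj ((f + 1, r, tl, c) :: rest) none good
          = (let res := tl.foldl (fun (st : List Int × Int) x =>
                let h := dfsA adj f x r st.2
                (st.1 ++ [h.1], h.2)) (c, good)
             runB adj rest (some (res.1.sum + 1))
               (if res.1.all (fun s => s = res.1.headD 0) then res.2 + 1 else res.2)) := by
      intro tl
      induction tl with
      | nil => intro r c good rest; simp [runB]
      | cons x tl ihtl =>
        intro r c good rest
        rw [runB]
        simp only [Option.toList_none, List.append_nil]
        rw [ih x r good, runB_absorb, ihtl r]
        simp [List.foldl_cons]
    intro r p good rest
    by_cases hleaf : (PySem.List.pyGetD adj r []).length = 1 ∧ (PySem.List.pyGetD adj r []).headD 0 = p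
    · -- A's leaf branch: adj[r] = [p]; the filtered pending list is empty, the values coincide
      obtain ⟨a, ha⟩ := List.length_eq_one_iff.1 hleaf.1
      have hap : a = p := by simpa [ha] using hleaf.2
      have hA : dfsA adj (f + 1) r p good = (1, good + 1) := by
        simp only [dfsA]; rw [if_pos hleaf]
      rw [ha, hap]
      have hfil : List.filter (fun y => decide (y ≠ p)) [p] = [] := by simp
      rw [hfil, inner [] r [] good rest, hA]
      simp
    · rw [inner _ r [] good rest]
      simp only [dfsA, if_neg hleaf]
      have hsw : (fun (st : List Int × Int) x =>
          if x = p then st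
          else
            let h := dfsA adj f x r st.2
            (st.1 ++ [h.1], h.2))
        = (fun (st : List Int × Int) x =>
          if x ≠ p then
            (let h := dfsA adj f x r st.2
             (st.1 ++ [h.1], h.2))
          else st) := by
        funext st x; by_cases hx : x = p <;> simp [hx]
      rw [hsw, PySem.List.foldl_ite_eq_foldl_filter (fun x => x ≠ p)]

-- ===== VERDICT (by name: the statement is the Claim_ definition above) =====
theorem countGoodNodes_spec : Claim_equal_countGoodNodes := by
  intro edges _ _
  unfold Spec_countGoodNodes countGoodNodes countGoodNodes_alt
  rw [runB_frame (pvBuildAdj edges) (pvFuel edges) 0 (-1) 0 []]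
  simp [runB]
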